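-- pv_equiv track=rewrite | github.com/rubelw/OSSS | src/OSSS/ai/agents/query_data/handlers/attendance_codes_handler.py | _select_attendance_codes_fields
-- ===== SOURCE A (Python) =====
-- from typing import Any, Dict, List, Sequence
--
-- def _select_attendance_codes_fields(
--     rows: Sequence[Dict[str, Any]],
-- ) -> List[str]:
--     if not rows:
--         return []
--
--     preferred_order = [
--         "id",
--         "code",
--         "short_code",
--         "description",
--         "state_code",
--         "is_present",
--         "is_absent",
--         "is_tardy",
--         "is_excused",
--         "counts_as_attendance",
--         "is_default",
--         "is_active",
--         "created_at",
--         "updated_at",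
--     ]
--
--     all_keys: List[str] = []
--     for r in rows:
--         for k in r:
--             if k not in all_keys:
--                 all_keys.append(k)
--
--     ordered = [k for k in preferred_order if k in all_keys]
--     ordered.extend(k for k in all_keys if k not in ordered)
--     return ordered
-- ===== SOURCE B (Python) =====
-- from typing import Any, Dict, List, Sequence
--
--
-- def _select_attendance_codes_fields(
--     rows: Sequence[Dict[str, Any]],
-- ) -> List[str]:
--     preferred_order = [
--         "id",
--         "code",
--         "short_code",
--         "description",
--         "state_code",
--         "is_present",
--         "is_absent",
--         "is_tardy",
--         "is_excused",
--         "counts_as_attendance",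
--         "is_default",
--         "is_active",
--         "created_at",
--         "updated_at",
--     ]
--     rank = {k: i for i, k in enumerate(preferred_order)}
--     sentinel = len(preferred_order)
--
--     first_seen: Dict[str, int] = {}
--     for r in rows:
--         for k in r:
--             if k not in first_seen:
--                 first_seen[k] = len(first_seen)
--
--     return sorted(first_seen, key=lambda k: (rank.get(k, sentinel), first_seen[k]))
-- ===== Notes on version B (the rewrite author's own statement) =====
-- stated objective: faster
-- what changed: Replaces A's quadratic list-membership scans and two rebuild passes (preferred filter + extend) by one pass recording each key's first-seen index in a dict, then a single sort keyed on (preferred rank, first-seen index).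
import Mathlib
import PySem

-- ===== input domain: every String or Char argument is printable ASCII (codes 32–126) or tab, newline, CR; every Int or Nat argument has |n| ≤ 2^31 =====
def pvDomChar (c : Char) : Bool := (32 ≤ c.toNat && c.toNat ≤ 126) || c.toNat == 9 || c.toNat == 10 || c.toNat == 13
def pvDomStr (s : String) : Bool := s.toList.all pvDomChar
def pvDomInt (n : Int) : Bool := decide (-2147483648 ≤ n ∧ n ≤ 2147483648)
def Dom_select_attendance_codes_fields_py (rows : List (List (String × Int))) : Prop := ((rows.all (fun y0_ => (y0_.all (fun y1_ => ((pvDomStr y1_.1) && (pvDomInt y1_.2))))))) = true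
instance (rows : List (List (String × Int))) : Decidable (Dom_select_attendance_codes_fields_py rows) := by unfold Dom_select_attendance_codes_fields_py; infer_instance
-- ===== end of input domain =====

-- B replaces A's quadratic membership scans and two rebuild passes by a first-seen-index
-- dict and a single sort keyed on (preferred rank, first-seen index); same return value.

-- ===== PORT A =====
def pvPreferredA : List String :=
  ["id", "code", "short_code", "description", "state_code", "is_present", "is_absent",
   "is_tardy", "is_excused", "counts_as_attendance", "is_default", "is_active",
   "created_at", "updated_at"]

def select_attendance_codes_fields_py (rows : List (List (String × Int))) : List String :=
  if rows = [] then []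
  else
    -- all_keys: append each key not already present ('for r in rows: for k in r: …')
    let all_keys : List String :=
      rows.foldl (fun acc r =>
        r.foldl (fun acc p => if p.1 ∈ acc then acc else acc ++ [p.1]) acc) []
    -- ordered = [k for k in preferred_order if k in all_keys]
    let ordered : List String := pvPreferredA.filter (fun k => k ∈ all_keys)
    -- ordered.extend(k for k in all_keys if k not in ordered): the generator sees the
    -- growing list, so ported as a fold appending when absent from the accumulator
    all_keys.foldl (fun acc k => if k ∈ acc then acc else acc ++ [k]) ordered

-- ===== PORT B =====
def pvPreferredB : List String :=
  ["id", "code", "short_code", "description", "state_code", "is_present", "is_absent",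
   "is_tardy", "is_excused", "counts_as_attendance", "is_default", "is_active",
   "created_at", "updated_at"]

-- rank = {k: i for i, k in enumerate(preferred_order)}
def pvRank : PySem.Dict String Int :=
  PySem.Dict.ofList ((PySem.List.enumerate pvPreferredB 0).map (fun p => (p.2, p.1)))

def select_attendance_codes_fields_py_alt (rows : List (List (String × Int))) : List String :=
  let sentinel : Int := (pvPreferredB.length : Int)
  -- first_seen: key ↦ first-seen index, one pass
  let first_seen : PySem.Dict String Int :=
    rows.foldl (fun d r =>
      r.foldl (fun d p => if d.contains p.1 then d else d.insert p.1 (d.size : Int)) d)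
      PySem.Dict.empty
  -- sorted(first_seen, key=lambda k: (rank.get(k, sentinel), first_seen[k])); every k
  -- iterated is a key of first_seen, so first_seen[k] never raises: getD is exact here
  PySem.List.sorted2 first_seen.keys
    (fun k => pvRank.getD k sentinel) (fun k => first_seen.getD k 0) false

-- ===== PRECONDITION & SPEC =====
def Spec_select_attendance_codes_fields_py (rows : List (List (String × Int))) (out : List String) : Prop := out = select_attendance_codes_fields_py_alt rows
instance (rows : List (List (String × Int))) (out : List String) : Decidable (Spec_select_attendance_codes_fields_py rows out) := by unfold Spec_select_attendance_codes_fields_py; infer_instance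

-- ===== CLAIM (what is proved, stated in full; the proofs are below) =====
def Claim_equal_select_attendance_codes_fields_py : Prop := ∀ (rows : List (List (String × Int))), Dom_select_attendance_codes_fields_py rows → Spec_select_attendance_codes_fields_py rows (select_attendance_codes_fields_py rows)

-- ===== LEMMAS AND PROOFS =====

-- the flattened key stream of the rows
def pvKeysOf (rows : List (List (String × Int))) : List String :=
  (rows.map (fun r => r.map Prod.fst)).flatten

-- the dict mapping the j-th element of L to j
def pvDictOf (L : List String) : PySem.Dict String Int :=
  PySem.Dict.mk ((PySem.List.enumerate L 0).map (fun p => (p.2, p.1)))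

theorem pvKeys_dictOf (L : List String) : (pvDictOf L).keys = L := by
  simp [pvDictOf, PySem.Dict.keys, List.map_map, Function.comp_def,
    PySem.List.map_snd_enumerate]

theorem pvAllKeys_eq (rows : List (List (String × Int))) :
    rows.foldl (fun acc r =>
        r.foldl (fun acc p => if p.1 ∈ acc then acc else acc ++ [p.1]) acc) [] =
      PySem.List.dedup (pvKeysOf rows) := by
  rw [PySem.List.dedup_eq_ofList, PySem.Set.ofList_eq_foldl, pvKeysOf, List.foldl_flatten,
    List.foldl_map]
  congr 1
  funext acc r
  rw [List.foldl_map]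
  congr 1
  funext a p
  by_cases h : p.1 ∈ a
  · simp [PySem.Set.add, PySem.Set.contains, h]
  · simp [PySem.Set.add, PySem.Set.contains, h]

theorem pvExtendLoop (L : List String) (s0 : List String) (h : L.Nodup) :
    L.foldl (fun acc k => if k ∈ acc then acc else acc ++ [k]) s0 =
      s0 ++ L.filter (fun k => k ∉ s0) := by
  induction L generalizing s0 with
  | nil => simp
  | cons x L ih =>
    have hx : x ∉ L := (List.nodup_cons.mp h).1
    have hL : L.Nodup := (List.nodup_cons.mp h).2
    by_cases hs : x ∈ s0
    · simp only [List.foldl_cons, if_pos hs, ih s0 hL]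
      rw [List.filter_cons_of_neg (by simpa using hs)]
    · simp only [List.foldl_cons, if_neg hs, ih (s0 ++ [x]) hL]
      rw [List.filter_cons_of_pos (by simpa using hs)]
      have hcong : L.filter (fun k => decide (k ∉ s0 ++ [x])) = L.filter (fun k => decide (k ∉ s0)) := by
        apply List.filter_congr
        intro y hy
        have hyx : y ≠ x := fun e => hx (e ▸ hy)
        simp [List.mem_append, hyx]
      rw [hcong]
      simp

theorem pvFirstSeenStep (ks : List String) (L : List String) (h : L.Nodup) :
    ks.foldl (fun d k => if d.contains k then d else d.insert k (d.size : Int)) (pvDictOf L)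
      = pvDictOf (ks.foldl PySem.Set.add L) := by
  induction ks generalizing L with
  | nil => rfl
  | cons k ks ih =>
    simp only [List.foldl_cons]
    by_cases hk : k ∈ L
    · have hc : (pvDictOf L).contains k = true := by
        rw [PySem.Dict.contains_iff_mem_keys, pvKeys_dictOf]; exact hk
      have hadd : PySem.Set.add L k = L := by
        simp [PySem.Set.add, PySem.Set.contains, hk]
      rw [if_pos hc, hadd]
      exact ih L h
    · have hc : (pvDictOf L).contains k = false := by
        rw [Bool.eq_false_iff]
        intro hcc
        exact hk (by simpa [pvKeys_dictOf] using (PySem.Dict.contains_iff_mem_keys _ _).mp hcc)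
      have hins : (pvDictOf L).insert k ((pvDictOf L).size : Int) = pvDictOf (L ++ [k]) := by
        apply PySem.Dict.ext
        rw [PySem.Dict.items_insert_of_not_contains _ _ hc]
        simp [pvDictOf, PySem.List.enumerate_append, PySem.Dict.size,
          PySem.List.length_enumerate, PySem.List.enumerate]
      have hadd : PySem.Set.add L k = L ++ [k] := by
        simp [PySem.Set.add, PySem.Set.contains, hk]
      rw [if_neg (by simp [hc]), hins, hadd]
      exact ih (L ++ [k]) (by simp [List.nodup_append, h]; exact fun a ha e => hk (e ▸ ha))

theorem pvFirstSeen_eq (rows : List (List (String × Int))) :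
    rows.foldl (fun d r =>
        r.foldl (fun d p => if d.contains p.1 then d else d.insert p.1 (d.size : Int)) d)
      PySem.Dict.empty = pvDictOf (PySem.List.dedup (pvKeysOf rows)) := by
  have hflat : rows.foldl (fun d r =>
        r.foldl (fun d p => if d.contains p.1 then d else d.insert p.1 (d.size : Int)) d)
      PySem.Dict.empty =
      (pvKeysOf rows).foldl
        (fun d k => if d.contains k then d else d.insert k (d.size : Int))
        PySem.Dict.empty := by
    rw [pvKeysOf, List.foldl_flatten, List.foldl_map]
    congr 1
    funext d r
    rw [List.foldl_map]
  have hempty : (PySem.Dict.empty : PySem.Dict String Int) = pvDictOf [] := rfl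
  rw [hflat, hempty, pvFirstSeenStep _ _ List.nodup_nil,
    PySem.List.dedup_eq_ofList, PySem.Set.ofList_eq_foldl]

theorem pvGetD_dictOf (L : List String) (h : L.Nodup) (j : Nat) (hj : j < L.length) :
    (pvDictOf L).getD L[j] 0 = (j : Int) := by
  have hmem : ((j : Int), L[j]) ∈ PySem.List.enumerate L 0 := by
    rw [PySem.List.mem_enumerate_iff]
    exact ⟨j, hj, by simp⟩
  have hitems : (L[j], (j : Int)) ∈ (pvDictOf L).items := by
    exact List.mem_map.mpr ⟨_, hmem, rfl⟩
  have hkeys : (pvDictOf L).keys.Nodup := by rw [pvKeys_dictOf]; exact h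
  exact PySem.Dict.getD_of_get?_eq_some _ _ (PySem.Dict.get?_of_mem_items _ hitems hkeys)

theorem pvSorted2_eq_sorted_lex (xs : List String) (k1 k2 : String → Int) :
    PySem.List.sorted2 xs k1 k2 false =
      PySem.List.sorted xs (fun x => toLex (k1 x, k2 x)) false := by
  have hfun : (fun a b => decide (k1 a < k1 b) || (!decide (k1 b < k1 a) && decide (k2 a < k2 b)))
      = (fun (a b : String) => decide (toLex (k1 a, k2 a) < toLex (k1 b, k2 b))) := by
    funext a b
    by_cases h1 : k1 a < k1 b
    · simp [Prod.Lex.toLex_lt_toLex, h1]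
    · by_cases h2 : k1 b < k1 a
      · have hne : ¬ (k1 a = k1 b) := by omega
        simp [Prod.Lex.toLex_lt_toLex, h1, h2, hne]
      · have he : k1 a = k1 b := le_antisymm (not_lt.mp h2) (not_lt.mp h1)
        simp [Prod.Lex.toLex_lt_toLex, he]
  show List.foldl (fun acc x => PySem.List.insertBy
      (fun a b => decide (k1 a < k1 b) || (!decide (k1 b < k1 a) && decide (k2 a < k2 b))) x acc) [] xs
    = List.foldl (fun acc x => PySem.List.insertBy
      (fun a b => decide (toLex (k1 a, k2 a) < toLex (k1 b, k2 b))) x acc) [] xs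
  rw [hfun]

-- ===== VERDICT (by name: the statement is the Claim_ definition above) =====
-- facts about the literal rank dict, decided once
theorem pvRank_keys : pvRank.keys = pvPreferredB := by decide

theorem pvRank_pairwise :
    pvPreferredB.Pairwise (fun a b => pvRank.getD a 14 < pvRank.getD b 14) := by decide

theorem pvRank_lt14 : ∀ a ∈ pvPreferredB, pvRank.getD a 14 < 14 := by decide

theorem pvRank_outside (k : String) (hk : k ∉ pvPreferredB) : pvRank.getD k 14 = 14 := by
  apply PySem.Dict.getD_of_not_contains
  rw [Bool.eq_false_iff]
  intro hc
  exact hk (by simpa [pvRank_keys] using (PySem.Dict.contains_iff_mem_keys _ _).mp hc)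

theorem pvPreferredB_nodup : pvPreferredB.Nodup := by decide

theorem pvDictOf_pairwise (L : List String) (h : L.Nodup) :
    L.Pairwise (fun a b => (pvDictOf L).getD a 0 < (pvDictOf L).getD b 0) := by
  rw [List.pairwise_iff_getElem]
  intro i j hi hj hij
  rw [pvGetD_dictOf L h i hi, pvGetD_dictOf L h j hj]
  exact_mod_cast hij

theorem select_attendance_codes_fields_py_spec : Claim_equal_select_attendance_codes_fields_py := by
  intro rows _
  show select_attendance_codes_fields_py rows = select_attendance_codes_fields_py_alt rows
  by_cases hrows : rows = []
  · subst hrows; rfl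
  unfold select_attendance_codes_fields_py select_attendance_codes_fields_py_alt
  rw [if_neg hrows]
  simp only [pvAllKeys_eq, pvFirstSeen_eq, pvKeys_dictOf]
  set L := PySem.List.dedup (pvKeysOf rows) with hLdef
  have hN : L.Nodup := PySem.List.nodup_dedup _
  set ordered := pvPreferredA.filter (fun k => decide (k ∈ L)) with hord
  rw [pvExtendLoop L ordered hN, pvSorted2_eq_sorted_lex]
  have hsent : ((pvPreferredB.length : Nat) : Int) = 14 := by decide
  set extras := L.filter (fun k => decide (k ∉ ordered)) with hext
  -- membership characterisations
  have hmem_ord : ∀ a, a ∈ ordered ↔ a ∈ pvPreferredB ∧ a ∈ L := by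
    intro a
    rw [hord]
    simp [pvPreferredA, pvPreferredB, List.mem_filter]
  have hmem_ext : ∀ b, b ∈ extras → b ∈ L ∧ b ∉ pvPreferredB := by
    intro b hb
    rw [hext] at hb
    rcases List.mem_filter.mp hb with ⟨hbL, hbno⟩
    refine ⟨hbL, fun hbP => ?_⟩
    have : b ∉ ordered := by simpa using hbno
    exact this ((hmem_ord b).mpr ⟨hbP, hbL⟩)
  have hord_nodup : ordered.Nodup := by
    rw [hord]; exact pvPreferredB_nodup.filter _
  -- the permutation
  have hperm : (ordered ++ extras).Perm L := by
    have h1 : (L.filter (fun k => decide (k ∈ ordered)) ++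
        L.filter (fun k => !decide (k ∈ ordered))).Perm L :=
      List.filter_append_perm _ L
    have h2 : ordered.Perm (L.filter (fun k => decide (k ∈ ordered))) := by
      rw [List.perm_ext_iff_of_nodup hord_nodup (hN.filter _)]
      intro a
      simp only [List.mem_filter, decide_eq_true_eq]
      constructor
      · intro ha; exact ⟨((hmem_ord a).mp ha).2, ha⟩
      · exact fun h => h.2
    have hext_eq : extras = L.filter (fun k => !decide (k ∈ ordered)) := by
      rw [hext]; simp
    rw [hext_eq]
    exact (h2.append (List.Perm.refl _)).trans h1
  -- the key is strictly increasing along A's output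
  have hpw : (ordered ++ extras).Pairwise (fun a b =>
      (fun k => toLex (pvRank.getD k ((pvPreferredB.length : Nat) : Int), (pvDictOf L).getD k 0)) a <
      (fun k => toLex (pvRank.getD k ((pvPreferredB.length : Nat) : Int), (pvDictOf L).getD k 0)) b) := by
    rw [List.pairwise_append]
    refine ⟨?_, ?_, ?_⟩
    · -- within ordered: ranks strictly increase
      have base : ordered.Pairwise (fun a b => pvRank.getD a 14 < pvRank.getD b 14) := by
        rw [hord]
        exact pvRank_pairwise.sublist List.filter_sublist
      refine base.imp ?_
      intro a b h
      simp only [hsent]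
      exact Prod.Lex.toLex_lt_toLex.mpr (Or.inl h)
    · -- within extras: both ranks are the sentinel, first-seen indices increase
      have base : extras.Pairwise (fun a b =>
          (pvDictOf L).getD a 0 < (pvDictOf L).getD b 0) := by
        rw [hext]
        exact (pvDictOf_pairwise L hN).sublist List.filter_sublist
      refine List.Pairwise.imp_of_mem ?_ base
      intro a b ha hb h
      have hra := pvRank_outside a (hmem_ext a ha).2
      have hrb := pvRank_outside b (hmem_ext b hb).2
      simp only [hsent, hra, hrb]
      exact Prod.Lex.toLex_lt_toLex.mpr (Or.inr ⟨rfl, h⟩)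
    · -- across: preferred rank < sentinel
      intro a ha b hb
      have hra : pvRank.getD a 14 < 14 := pvRank_lt14 a ((hmem_ord a).mp ha).1
      have hrb := pvRank_outside b (hmem_ext b hb).2
      simp only [hsent, hrb]
      exact Prod.Lex.toLex_lt_toLex.mpr (Or.inl (by omega))
  exact (PySem.List.sorted_eq_of_perm_of_pairwise_lt L (ordered ++ extras) _ hperm hpw).symm
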